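-- pv_equiv track=rewrite | github.com/justinmvail/glossy | font_scraper/stroke_merge_utils.py | _build_cluster_endpoint_map
-- ===== SOURCE A (Python) =====
-- from collections import defaultdict
--
-- def endpoint_cluster(stroke: list[tuple], from_end: bool, assigned: list[set]) -> int:
--     """Find which junction cluster contains a stroke endpoint.
--
--     Checks if the specified endpoint of a stroke lies within any of the
--     assigned junction clusters, with a small tolerance for nearby pixels.
--
--     Args:
--         stroke: List of (x, y) coordinate tuples.
--         from_end: If True, check the last point; if False, check the first.
--         assigned: List of sets, where each set contains (x, y) integer tuples
--             representing pixels in a junction cluster.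
--
--     Returns:
--         The index of the cluster containing the endpoint (0-indexed), or -1
--         if the endpoint is not in any cluster.
--
--     Note:
--         The function checks the exact pixel position and all 8 neighboring
--         pixels (3x3 neighborhood) to handle slight misalignments between
--         stroke endpoints and cluster centers.
--     """
--     if not stroke:
--         return -1
--
--     pt = stroke[-1] if from_end else stroke[0]
--     if isinstance(pt, (list, tuple)):
--         pt_int = (int(round(pt[0])), int(round(pt[1])))
--     else:
--         pt_int = pt
--
--     for i, cluster in enumerate(assigned):
--         if pt_int in cluster:
--             return i
--         # Check nearby
--         for dx in [-1, 0, 1]: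
--             for dy in [-1, 0, 1]:
--                 if (pt_int[0] + dx, pt_int[1] + dy) in cluster:
--                     return i
--     return -1
--
-- def _build_cluster_endpoint_map(strokes: list[list[tuple]],
--                                  assigned: list[set],
--                                  cluster_cache: dict = None) -> dict[int, list[tuple]]:
--     """Build a mapping from cluster indices to stroke endpoints.
--
--     Args:
--         strokes: List of stroke paths.
--         assigned: List of junction cluster sets.
--         cluster_cache: Optional dict to populate with (stroke_idx, from_end) -> cluster_id.
--             If provided, will be filled during the map building to avoid redundant lookups.
--
--     Returns:
--         Dict mapping cluster index to list of (stroke_index, 'start'/'end') tuples.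
--     """
--     cluster_map = defaultdict(list)
--     for si, s in enumerate(strokes):
--         sc = endpoint_cluster(s, False, assigned)
--         ec = endpoint_cluster(s, True, assigned)
--         if cluster_cache is not None:
--             cluster_cache[(si, False)] = sc
--             cluster_cache[(si, True)] = ec
--         if sc >= 0:
--             cluster_map[sc].append((si, 'start'))
--         if ec >= 0:
--             cluster_map[ec].append((si, 'end'))
--     return dict(cluster_map)
-- ===== SOURCE B (Python) =====
-- def _build_cluster_endpoint_map(strokes: list[list[tuple]],
--                                  assigned: list[set],
--                                  cluster_cache: dict = None) -> dict[int, list[tuple]]: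
--     """Point-index re-implementation: build one dict mapping each cluster pixel
--     to the smallest index of a cluster containing it, then resolve every stroke
--     endpoint with nine dict lookups instead of a scan over all clusters.
--
--     Return value is equivalent to the original; cluster_cache is mutated the
--     same way when provided.
--     """
--     # pixel -> first (smallest) cluster index containing it
--     idx = {}
--     for i, cluster in enumerate(assigned):
--         for p in cluster:
--             idx.setdefault(p, i)
--
--     def lookup(stroke, from_end):
--         if not stroke:
--             return -1
--         pt = stroke[-1] if from_end else stroke[0]
--         x, y = int(round(pt[0])), int(round(pt[1]))
--         best = -1
--         for dx in (-1, 0, 1):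
--             for dy in (-1, 0, 1):
--                 c = idx.get((x + dx, y + dy))
--                 if c is not None and (best < 0 or c < best):
--                     best = c
--         return best
--
--     cluster_map = {}
--     for si, s in enumerate(strokes):
--         for from_end, label in ((False, 'start'), (True, 'end')):
--             c = lookup(s, from_end)
--             if cluster_cache is not None:
--                 cluster_cache[(si, from_end)] = c
--             if c >= 0:
--                 cluster_map.setdefault(c, []).append((si, label))
--     return cluster_map
-- ===== Notes on version B (the rewrite author's own statement) =====
-- stated objective: alternative
-- what changed: B builds a pixel-to-first-cluster-index dictionary once and resolves each stroke endpoint with nine dict lookups, instead of A's per-endpoint scan over all clusters with a 3x3 membership test per cluster.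
import Mathlib
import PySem

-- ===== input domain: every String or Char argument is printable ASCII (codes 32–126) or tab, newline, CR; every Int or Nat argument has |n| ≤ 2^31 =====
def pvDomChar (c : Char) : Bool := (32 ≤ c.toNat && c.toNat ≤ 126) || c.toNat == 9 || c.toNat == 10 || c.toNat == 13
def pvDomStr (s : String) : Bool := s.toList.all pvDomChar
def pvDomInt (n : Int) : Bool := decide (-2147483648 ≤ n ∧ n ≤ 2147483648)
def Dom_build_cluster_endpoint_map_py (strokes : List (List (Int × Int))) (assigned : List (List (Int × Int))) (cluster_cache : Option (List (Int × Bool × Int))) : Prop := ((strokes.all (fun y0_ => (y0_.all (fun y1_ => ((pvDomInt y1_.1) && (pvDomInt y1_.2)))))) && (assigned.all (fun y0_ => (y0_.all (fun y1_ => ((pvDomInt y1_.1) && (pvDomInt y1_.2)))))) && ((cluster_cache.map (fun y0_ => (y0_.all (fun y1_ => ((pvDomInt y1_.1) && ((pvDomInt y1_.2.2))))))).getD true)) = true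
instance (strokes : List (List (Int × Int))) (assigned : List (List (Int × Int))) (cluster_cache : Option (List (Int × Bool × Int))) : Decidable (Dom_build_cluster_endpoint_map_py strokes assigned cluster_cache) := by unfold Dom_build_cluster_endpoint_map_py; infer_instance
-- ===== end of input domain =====

-- B replaces the per-endpoint scan over all clusters by a pixel→first-cluster index built once,
-- resolving each endpoint with nine dictionary lookups instead (objective: alternative).
-- Both versions write into cluster_cache when given; the equivalence proved is about the RETURN value only
-- (both Pythons perform the identical cache mutation).

-- ===== PORT A =====
-- 3x3 neighbourhood check: the nested 'for dx … for dy …: if (…) in cluster: return i'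
def pvNearHit (pt : Int × Int) (cluster : List (Int × Int)) : Bool :=
  [(-1 : Int), 0, 1].any (fun dx => [(-1 : Int), 0, 1].any (fun dy => cluster.contains (pt.1 + dx, pt.2 + dy)))

-- the 'for i, cluster in enumerate(assigned)' loop of endpoint_cluster with its early returns
def pvScanA (pt : Int × Int) (i : Int) : List (List (Int × Int)) → Int
  | [] => -1
  | c :: rest =>
    if c.contains pt then i
    else if pvNearHit pt c then i
    else pvScanA pt (i + 1) rest

-- endpoint_cluster; coordinates are Int on this domain, so int(round(x)) is the identity (ported as such)
def endpoint_cluster_py (stroke : List (Int × Int)) (from_end : Bool) (assigned : List (List (Int × Int))) : Int :=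
  match stroke with
  | [] => -1
  | p :: ps =>
    let pt : Int × Int := if from_end then (p :: ps).getLastD (0, 0) else p
    pvScanA pt 0 assigned

-- _build_cluster_endpoint_map; cluster_cache is only written, never read, so it does not affect the return
def build_cluster_endpoint_map_py (strokes : List (List (Int × Int))) (assigned : List (List (Int × Int))) (cluster_cache : Option (List (Int × Bool × Int))) : List (Int × List (Int × String)) :=
  ((PySem.List.enumerate strokes).foldl
    (fun (cm : PySem.Dict Int (List (Int × String))) p =>
      let si := p.1
      let sc := endpoint_cluster_py p.2 false assigned
      let ec := endpoint_cluster_py p.2 true assigned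
      let cm := if sc ≥ 0 then cm.modify sc [] (fun l => l ++ [(si, "start")]) else cm
      let cm := if ec ≥ 0 then cm.modify ec [] (fun l => l ++ [(si, "end")]) else cm
      cm)
    PySem.Dict.empty).items

-- ===== PORT B =====
-- pixel -> first (smallest) cluster index containing it
def pvBuildIdx (assigned : List (List (Int × Int))) : PySem.Dict (Int × Int) Int :=
  (PySem.List.enumerate assigned).foldl
    (fun d p => p.2.foldl (fun d q => d.setdefault q p.1) d) PySem.Dict.empty

-- the nine (dx, dy) offsets of Source B's lookup, in loop order
def pvOffsets : List (Int × Int) :=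
  [(-1, -1), (-1, 0), (-1, 1), (0, -1), (0, 0), (0, 1), (1, -1), (1, 0), (1, 1)]

-- Source B's 'lookup': nine dict lookups, keeping the smallest cluster index found
def pvLookup (idx : PySem.Dict (Int × Int) Int) (stroke : List (Int × Int)) (from_end : Bool) : Int :=
  match stroke with
  | [] => -1
  | p :: ps =>
    let pt : Int × Int := if from_end then (p :: ps).getLastD (0, 0) else p
    pvOffsets.foldl
      (fun best o =>
        match idx.get? (pt.1 + o.1, pt.2 + o.2) with
        | some c => if best < 0 || c < best then c else best
        | none => best)
      (-1)

def build_cluster_endpoint_map_py_alt (strokes : List (List (Int × Int))) (assigned : List (List (Int × Int))) (cluster_cache : Option (List (Int × Bool × Int))) : List (Int × List (Int × String)) :=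
  let idx := pvBuildIdx assigned
  ((PySem.List.enumerate strokes).foldl
    (fun (cm : PySem.Dict Int (List (Int × String))) p =>
      [(false, "start"), (true, "end")].foldl
        (fun cm fl =>
          let c := pvLookup idx p.2 fl.1
          if c ≥ 0 then cm.modify c [] (fun l => l ++ [(p.1, fl.2)]) else cm)
        cm)
    PySem.Dict.empty).items

-- ===== PRECONDITION & SPEC =====
def Spec_build_cluster_endpoint_map_py (strokes : List (List (Int × Int))) (assigned : List (List (Int × Int))) (cluster_cache : Option (List (Int × Bool × Int))) (out : List (Int × List (Int × String))) : Prop := out = build_cluster_endpoint_map_py_alt strokes assigned cluster_cache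
instance (strokes : List (List (Int × Int))) (assigned : List (List (Int × Int))) (cluster_cache : Option (List (Int × Bool × Int))) (out : List (Int × List (Int × String))) : Decidable (Spec_build_cluster_endpoint_map_py strokes assigned cluster_cache out) := by unfold Spec_build_cluster_endpoint_map_py; infer_instance

-- ===== CLAIM (what is proved, stated in full; the proofs are below) =====
def Claim_equal_build_cluster_endpoint_map_py : Prop := ∀ (strokes : List (List (Int × Int))) (assigned : List (List (Int × Int))) (cluster_cache : Option (List (Int × Bool × Int))), Dom_build_cluster_endpoint_map_py strokes assigned cluster_cache → Spec_build_cluster_endpoint_map_py strokes assigned cluster_cache (build_cluster_endpoint_map_py strokes assigned cluster_cache)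

-- ===== LEMMAS AND PROOFS =====

-- first cluster index (as a Nat offset) containing the pixel q
def pvFirstHit (q : Int × Int) : List (List (Int × Int)) → Option Nat
  | [] => none
  | c :: rest => if c.contains q then some 0 else (pvFirstHit q rest).map (· + 1)

-- first cluster index whose pixels meet the 3x3 neighbourhood of pt
def pvFirstAny (pt : Int × Int) : List (List (Int × Int)) → Option Nat
  | [] => none
  | c :: rest =>
    if pvOffsets.any (fun o => c.contains (pt.1 + o.1, pt.2 + o.2)) then some 0
    else (pvFirstAny pt rest).map (· + 1)

def pvOmin : Option Nat → Option Nat → Option Nat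
  | none, b => b
  | some a, none => some a
  | some a, some b => some (min a b)

def pvEnc : Option Nat → Int
  | none => -1
  | some k => (k : Int)

theorem pvHit_eq (pt : Int × Int) (c : List (Int × Int)) :
    (c.contains pt || pvNearHit pt c) = pvOffsets.any (fun o => c.contains (pt.1 + o.1, pt.2 + o.2)) := by
  have h : pt = (pt.1 + 0, pt.2 + 0) := by simp
  rw [Bool.eq_iff_iff]
  simp only [pvNearHit, pvOffsets, List.any_cons, List.any_nil, Bool.or_false, Bool.or_eq_true]
  constructor
  · rintro (h0 | h)
    · rw [h] at h0; tauto
    · tauto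
  · tauto

theorem pvScanA_eq (pt : Int × Int) : ∀ (assigned : List (List (Int × Int))) (n : Int),
    pvScanA pt n assigned = (match pvFirstAny pt assigned with
      | some k => n + (k : Int)
      | none => -1) := by
  intro assigned
  induction assigned with
  | nil => intro n; simp [pvScanA, pvFirstAny]
  | cons c rest ih =>
    intro n
    have hh := pvHit_eq pt c
    simp only [pvScanA, pvFirstAny]
    by_cases h1 : c.contains pt = true
    · have hany : (pvOffsets.any fun o => c.contains (pt.1 + o.1, pt.2 + o.2)) = true := by
        rw [← hh, h1]; simp
      rw [if_pos h1, if_pos hany]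
      simp
    · rw [if_neg h1]
      by_cases h2 : pvNearHit pt c = true
      · have hany : (pvOffsets.any fun o => c.contains (pt.1 + o.1, pt.2 + o.2)) = true := by
          rw [← hh, h2]; simp
        rw [if_pos h2, if_pos hany]
        simp
      · have h1' : c.contains pt = false := by simpa using h1
        have h2' : pvNearHit pt c = false := by simpa using h2
        have hany : (pvOffsets.any fun o => c.contains (pt.1 + o.1, pt.2 + o.2)) = false := by
          rw [← hh, h1', h2']; rfl
        rw [if_neg h2, if_neg (by rw [hany]; simp)]
        rw [ih (n + 1)]
        cases pvFirstAny pt rest with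
        | none => simp
        | some k => simp; ring

-- setdefault over one cluster: existing bindings win, otherwise the cluster claims index i
theorem pvSetdefault_fold_get (c : List (Int × Int)) :
    ∀ (d : PySem.Dict (Int × Int) Int) (i : Int) (q : Int × Int),
    (c.foldl (fun d q' => d.setdefault q' i) d).get? q
      = if (d.get? q).isSome then d.get? q else if c.contains q then some i else none := by
  induction c with
  | nil => intro d i q; simp
  | cons a c ih =>
    intro d i q
    simp only [List.foldl_cons, List.contains_cons]
    rw [ih]
    by_cases hc : d.contains a = true
    · rw [PySem.Dict.setdefault_of_contains _ _ hc]
      by_cases hq : (d.get? q).isSome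
      · simp [hq]
      · simp only [hq, Bool.false_eq_true, if_false]
        have hne : d.get? a ≠ none := by
          rwa [PySem.Dict.contains_eq_isSome_get?, Option.isSome_iff_ne_none] at hc
        by_cases haq : q = a
        · subst haq
          simp only [Bool.not_eq_true, Option.isSome_eq_false_iff, Option.isNone_iff_eq_none] at hq
          exact absurd hq hne
        · simp [beq_iff_eq, haq]
    · rw [PySem.Dict.setdefault_of_not_contains _ _ (by simpa using hc)]
      by_cases haq : q = a
      · subst haq
        have hn : d.get? q = none := by
          have hcc := hc
          rwa [PySem.Dict.contains_eq_isSome_get?, Bool.not_eq_true, Option.isSome_eq_false_iff,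
               Option.isNone_iff_eq_none] at hcc
        simp [PySem.Dict.get?_insert_self, hn]
      · rw [PySem.Dict.get?_insert_of_ne _ _ haq]
        by_cases hq : (d.get? q).isSome
        · simp [hq]
        · simp [hq, beq_iff_eq, haq]

theorem pvBuildIdx_from_get : ∀ (assigned : List (List (Int × Int))) (n : Int) (d : PySem.Dict (Int × Int) Int) (q : Int × Int),
    ((PySem.List.enumerate assigned n).foldl (fun d p => p.2.foldl (fun d q' => d.setdefault q' p.1) d) d).get? q
      = if (d.get? q).isSome then d.get? q
        else (pvFirstHit q assigned).map (fun k => n + (k : Int)) := by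
  intro assigned
  induction assigned with
  | nil => intro n d q; simp [PySem.List.enumerate_nil, pvFirstHit]
  | cons c rest ih =>
    intro n d q
    rw [PySem.List.enumerate_cons, List.foldl_cons, ih]
    simp only [pvFirstHit]
    rw [pvSetdefault_fold_get]
    by_cases hq : (d.get? q).isSome
    · simp [hq]
    · simp only [hq, Bool.false_eq_true, if_false]
      by_cases hc : q ∈ c
      · have hc' : c.contains q = true := by simpa using hc
        simp [hc]
      · have hc' : c.contains q = false := by simpa using hc
        simp only [hc', Bool.false_eq_true, if_false, Option.isSome_none]
        cases pvFirstHit q rest with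
        | none => simp
        | some k => simp; ring

theorem pvBuildIdx_get (assigned : List (List (Int × Int))) (q : Int × Int) :
    (pvBuildIdx assigned).get? q = (pvFirstHit q assigned).map (fun k => Int.ofNat k) := by
  unfold pvBuildIdx
  rw [pvBuildIdx_from_get]
  simp
  cases pvFirstHit q assigned <;> rfl

theorem pvOmin_zero_left (b : Option Nat) : pvOmin (some 0) b = some 0 := by
  cases b <;> simp [pvOmin]

theorem pvOmin_zero_right (a : Option Nat) : pvOmin a (some 0) = some 0 := by
  cases a <;> simp [pvOmin]

theorem pvOmin_map_succ (a b : Option Nat) :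
    pvOmin (a.map (· + 1)) (b.map (· + 1)) = (pvOmin a b).map (· + 1) := by
  cases a <;> cases b <;> simp [pvOmin, Nat.succ_min_succ]

theorem pvFold_omin_succ (g : Int × Int → Option Nat) :
    ∀ (os : List (Int × Int)) (acc : Option Nat),
    os.foldl (fun acc o => pvOmin acc ((g o).map (· + 1))) (acc.map (· + 1))
      = (os.foldl (fun acc o => pvOmin acc (g o)) acc).map (· + 1) := by
  intro os
  induction os with
  | nil => intro acc; simp
  | cons o os ih => intro acc; simp only [List.foldl_cons, pvOmin_map_succ]; exact ih _

theorem pvFold_omin_absorb (g : Int × Int → Option Nat) :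
    ∀ (os : List (Int × Int)), os.foldl (fun acc o => pvOmin acc (g o)) (some 0) = some 0 := by
  intro os
  induction os with
  | nil => rfl
  | cons o os ih => simp only [List.foldl_cons, pvOmin_zero_left]; exact ih

theorem pvFold_omin_eq_zero (g : Int × Int → Option Nat) :
    ∀ (os : List (Int × Int)) (acc : Option Nat), (∃ o ∈ os, g o = some 0) →
    os.foldl (fun acc o => pvOmin acc (g o)) acc = some 0 := by
  intro os
  induction os with
  | nil => rintro acc ⟨o, ho, _⟩; cases ho
  | cons o os ih =>
    rintro acc ⟨o', ho', hg⟩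
    rcases List.mem_cons.mp ho' with h | h
    · subst h
      simp only [List.foldl_cons, hg, pvOmin_zero_right]
      exact pvFold_omin_absorb g os
    · simp only [List.foldl_cons]
      exact ih _ ⟨o', h, hg⟩

-- the minimum over the neighbourhood of the per-pixel first hit IS the first cluster met by the neighbourhood
theorem pvMin_firstHit (pt : Int × Int) : ∀ (assigned : List (List (Int × Int))),
    pvOffsets.foldl (fun acc o => pvOmin acc (pvFirstHit (pt.1 + o.1, pt.2 + o.2) assigned)) none
      = pvFirstAny pt assigned := by
  intro assigned
  induction assigned with
  | nil => rfl
  | cons c rest ih =>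
    simp only [pvFirstAny]
    by_cases h : pvOffsets.any (fun o => c.contains (pt.1 + o.1, pt.2 + o.2)) = true
    · rw [if_pos h]
      rw [List.any_eq_true] at h
      obtain ⟨o, ho, hc⟩ := h
      exact pvFold_omin_eq_zero _ _ _ ⟨o, ho, by simp [pvFirstHit, (by simpa using hc : (pt.1 + o.1, pt.2 + o.2) ∈ c)]⟩
    · rw [if_neg h]
      have hall : ∀ (acc : Option Nat) (o : Int × Int), o ∈ pvOffsets →
          pvOmin acc (pvFirstHit (pt.1 + o.1, pt.2 + o.2) (c :: rest))
            = pvOmin acc ((pvFirstHit (pt.1 + o.1, pt.2 + o.2) rest).map (· + 1)) := by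
        intro acc o ho
        simp only [pvFirstHit]
        rw [if_neg]
        intro hc
        exact h (List.any_eq_true.mpr ⟨o, ho, by simpa using hc⟩)
      rw [PySem.List.foldl_congr_mem _ _ _ _ hall]
      have hnone : (none : Option Nat) = Option.map (· + 1) none := rfl
      rw [hnone, pvFold_omin_succ, ih]

theorem pvIntFold_step (a : Option Nat) (m : Option Nat) :
    (match m.map (fun k => Int.ofNat k) with
      | some c => if pvEnc a < 0 || c < pvEnc a then c else pvEnc a
      | none => pvEnc a) = pvEnc (pvOmin a m) := by
  cases a with
  | none =>
    cases m with
    | none => rfl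
    | some c => simp [pvEnc, pvOmin]
  | some x =>
    cases m with
    | none => rfl
    | some c =>
      simp only [Option.map_some, pvEnc, pvOmin]
      split_ifs with h
      all_goals simp only [Bool.or_eq_true, decide_eq_true_eq, Int.ofNat_eq_natCast] at *
      all_goals omega

theorem pvIntFold (g : Int × Int → Option Nat) :
    ∀ (os : List (Int × Int)) (a : Option Nat),
    os.foldl (fun best o =>
        match (g o).map (fun k => Int.ofNat k) with
        | some c => if best < 0 || c < best then c else best
        | none => best) (pvEnc a)
      = pvEnc (os.foldl (fun acc o => pvOmin acc (g o)) a) := by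
  intro os
  induction os with
  | nil => intro a; rfl
  | cons o os ih =>
    intro a
    simp only [List.foldl_cons]
    rw [pvIntFold_step a (g o)]
    exact ih _

-- the nine dict lookups compute exactly what A's scan over all clusters computes
theorem pvLookup_eq (assigned : List (List (Int × Int))) (stroke : List (Int × Int)) (b : Bool) :
    pvLookup (pvBuildIdx assigned) stroke b = endpoint_cluster_py stroke b assigned := by
  cases stroke with
  | nil => rfl
  | cons p ps =>
    simp only [pvLookup, endpoint_cluster_py]
    set pt : Int × Int := if b then (p :: ps).getLastD (0, 0) else p with hpt
    have hrw : ∀ (best : Int) (o : Int × Int), o ∈ pvOffsets →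
        (match (pvBuildIdx assigned).get? (pt.1 + o.1, pt.2 + o.2) with
          | some c => if best < 0 || c < best then c else best
          | none => best)
        = (match (pvFirstHit (pt.1 + o.1, pt.2 + o.2) assigned).map (fun k => Int.ofNat k) with
          | some c => if best < 0 || c < best then c else best
          | none => best) := by
      intro best o _
      rw [pvBuildIdx_get]
    rw [PySem.List.foldl_congr_mem _ _ _ _ hrw]
    have h1 : (-1 : Int) = pvEnc none := rfl
    rw [h1, pvIntFold (fun o => pvFirstHit (pt.1 + o.1, pt.2 + o.2) assigned) pvOffsets none,
        pvMin_firstHit, pvScanA_eq]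
    cases pvFirstAny pt assigned with
    | none => rfl
    | some k => simp [pvEnc]

-- ===== VERDICT (by name: the statement is the Claim_ definition above) =====
theorem build_cluster_endpoint_map_py_spec : Claim_equal_build_cluster_endpoint_map_py := by
  intro strokes assigned cc _
  unfold Spec_build_cluster_endpoint_map_py
  unfold build_cluster_endpoint_map_py build_cluster_endpoint_map_py_alt
  have hstep : ∀ (cm : PySem.Dict Int (List (Int × String))) (p : Int × List (Int × Int)),
      p ∈ PySem.List.enumerate strokes →
      (let si := p.1
       let sc := endpoint_cluster_py p.2 false assigned
       let ec := endpoint_cluster_py p.2 true assigned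
       let cm1 := if sc ≥ 0 then cm.modify sc [] (fun l => l ++ [(si, "start")]) else cm
       if ec ≥ 0 then cm1.modify ec [] (fun l => l ++ [(si, "end")]) else cm1)
      = [(false, "start"), (true, "end")].foldl
          (fun cm fl =>
            let c := pvLookup (pvBuildIdx assigned) p.2 fl.1
            if c ≥ 0 then cm.modify c [] (fun l => l ++ [(p.1, fl.2)]) else cm)
          cm := by
    intro cm p _
    simp only [List.foldl_cons, List.foldl_nil, pvLookup_eq]
  rw [PySem.List.foldl_congr_mem _ _ _ _ hstep]
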